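-- pv_equiv track=rewrite | github.com/gosch/Katas-in-python | Mar/weakNumbers.py | weakNumbers
-- ===== SOURCE A (Python) =====
-- def weakNumbers(n):
--     divisors = []
--     for i in range(1, n + 1):
--         count = 0
--         for j in range(1, i + 1):
--             if i % j == 0:
--                 count += 1
--         divisors.append(count)
--
--     weakness = []
--     for i in range(len(divisors)):
--         count = 0
--         for j in range(0, i):
--             if divisors[j] > divisors[i]:
--                 count += 1
--         weakness.append(count)
--
--     weakness.sort(reverse=True)
--     count = 1
--     for i in range(1, len(weakness)):
--         if weakness[i] == weakness[0]:
--             count += 1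
--         else:
--             break
--
--     return [weakness[0], count]
-- ===== SOURCE B (Python) =====
-- def weakNumbers(n):
--     # divisor counts 1..n by a sieve instead of trial division
--     divisors = [0] * n
--     for j in range(1, n + 1):
--         for m in range(j, n + 1, j):
--             divisors[m - 1] += 1
--     # weakness via a value-indexed counter of earlier divisor counts
--     maxd = max(divisors)
--     cnt = [0] * (maxd + 1)
--     weakness = []
--     for d in divisors:
--         weakness.append(sum(cnt[d + 1:]))
--         cnt[d] += 1
--     m = max(weakness)
--     return [m, weakness.count(m)]
-- ===== Notes on version B (the rewrite author's own statement) =====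
-- stated objective: faster
-- what changed: B replaces A's trial-division divisor counting, quadratic earlier-greater scan and sort-plus-run-length extraction by a multiples sieve, a divisor-count-indexed counter whose suffix sum gives each weakness in one pass, and a direct max/count of the weakness list.
-- outside the precondition, e.g. on weakNumbers(0): A raises IndexError, B raises ValueError
import Mathlib
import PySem

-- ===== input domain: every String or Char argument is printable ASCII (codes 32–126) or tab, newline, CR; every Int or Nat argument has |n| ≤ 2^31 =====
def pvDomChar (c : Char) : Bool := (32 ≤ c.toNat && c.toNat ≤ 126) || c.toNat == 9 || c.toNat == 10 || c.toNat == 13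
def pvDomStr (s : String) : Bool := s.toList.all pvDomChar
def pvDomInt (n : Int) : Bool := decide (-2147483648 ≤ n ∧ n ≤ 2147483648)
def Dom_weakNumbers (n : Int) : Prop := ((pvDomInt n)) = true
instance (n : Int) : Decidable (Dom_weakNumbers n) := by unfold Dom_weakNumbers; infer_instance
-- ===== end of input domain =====

-- B replaces A's two quadratic scans by a divisor sieve plus a count-indexed counter and a direct
-- max/count (measured faster); Pre_ excludes n ≤ 0, where A raises IndexError (weakness[0] on []).


-- ===== PORT A =====
-- 'for i in range(1, len(weakness)): if weakness[i] == weakness[0]: count += 1 else: break',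
-- transliterated as structural recursion over the tail of the sorted list (break = stop recursing)
def pvRunA (w0 : Int) : List Int → Int
  | [] => 0
  | y :: t => if y == w0 then 1 + pvRunA w0 t else 0

def weakNumbers (n : Int) : List Int :=
  let divisors : List Int :=
    (PySem.List.pyRange 1 (n + 1) 1).foldl (fun acc i =>
      let count : Int :=
        (PySem.List.pyRange 1 (i + 1) 1).foldl
          (fun c j => if PySem.Int.mod i j == 0 then c + 1 else c) 0
      acc ++ [count]) []
  let weakness : List Int :=
    (PySem.List.pyRange 0 (divisors.length : Int) 1).foldl (fun acc i =>
      let count : Int :=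
        (PySem.List.pyRange 0 i 1).foldl
          (fun c j => if PySem.List.pyGetD divisors j 0 > PySem.List.pyGetD divisors i 0
                      then c + 1 else c) 0
      acc ++ [count]) []
  let weakness := PySem.List.sorted weakness (fun x => x) true
  -- weakness[0]: IndexError on the empty list (n ≤ 0) is excluded by Pre_, so the default never shows
  let w0 := PySem.List.pyGetD weakness 0 0
  let count : Int := 1 + pvRunA w0 (weakness.drop 1)
  [w0, count]

-- ===== PORT B =====
def weakNumbers_alt (n : Int) : List Int :=
  -- divisor counts 1..n by a sieve: [0]*n, then divisors[m-1] += 1 for every multiple m of every j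
  let divisors : List Int :=
    (PySem.List.pyRange 1 (n + 1) 1).foldl (fun arr j =>
      (PySem.List.pyRange j (n + 1) j).foldl (fun a m =>
        PySem.List.pySetD a (m - 1) (PySem.List.pyGetD a (m - 1) 0 + 1)) arr)
      (List.replicate n.toNat 0)
  -- max(divisors): ValueError on the empty list (n ≤ 0) is excluded by Pre_, so the default never shows
  let maxd : Int := (PySem.List.max? divisors (fun x => x)).getD 0
  -- one pass: weakness of d = sum of the counter above d; then count d
  let st :=
    divisors.foldl (fun s d =>
      (PySem.List.pySetD s.1 d (PySem.List.pyGetD s.1 d 0 + 1),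
       s.2 ++ [(PySem.List.slice s.1 (some (d + 1)) none).sum]))
      (List.replicate (maxd + 1).toNat 0, [])
  let weakness := st.2
  -- max(weakness): same remark as above
  let m : Int := (PySem.List.max? weakness (fun x => x)).getD 0
  [m, (weakness.count m : Int)]

-- ===== PRECONDITION & SPEC =====
-- Pre_ excludes exactly n ≤ 0: there A raises IndexError (weakness[0] on the empty list) — and B's
-- max(divisors) raises ValueError
def Pre_weakNumbers (n : Int) : Prop := 1 ≤ n
instance (n : Int) : Decidable (Pre_weakNumbers n) := by unfold Pre_weakNumbers; infer_instance
def pvWitness_weakNumbers : Int := 3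

def Spec_weakNumbers (n : Int) (out : List Int) : Prop := out = weakNumbers_alt n
instance (n : Int) (out : List Int) : Decidable (Spec_weakNumbers n out) := by unfold Spec_weakNumbers; infer_instance

-- ===== CLAIM (what is proved, stated in full; the proofs are below) =====
def Claim_equal_weakNumbers : Prop := ∀ (n : Int), Dom_weakNumbers n → Pre_weakNumbers n → Spec_weakNumbers n (weakNumbers n)

-- ===== LEMMAS AND PROOFS =====

-- the mathematical divisor count A computes for i
def pvNd (i : Int) : Int :=
  ((PySem.List.pyRange 1 (i + 1) 1).countP (fun j => PySem.Int.mod i j == 0) : Int)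

-- the weakness list, built left to right with explicit prefix p
def pvW (p : List Int) : List Int → List Int
  | [] => []
  | d :: t => ((p.countP (fun x => decide (d < x)) : Int)) :: pvW (p ++ [d]) t

-- the counter state of B's middle loop after processing p (counter length L)
def pvCnt (L : Nat) (p : List Int) : List Int :=
  (List.range L).map (fun v => (p.count ((v : Nat) : Int) : Int))

-- ---------- small generalities specific to the two ports ----------

theorem pvW_length (ds : List Int) : ∀ (p : List Int), (pvW p ds).length = ds.length := by
  induction ds with
  | nil => intro p; rfl
  | cons d t ih => intro p; simp [pvW, ih]

-- pvW written with an index over List.range (the shape A's loop produces)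
theorem pvW_map (ds : List Int) : ∀ (p : List Int),
    pvW p ds = (List.range ds.length).map
      (fun i => (((p ++ ds.take i).countP (fun x => decide (ds.getD i 0 < x)) : Nat) : Int)) := by
  induction ds with
  | nil => intro p; rfl
  | cons d t ih =>
    intro p
    simp only [pvW, List.length_cons, List.range_succ_eq_map, List.map_cons, List.map_map]
    rw [List.cons.injEq]
    refine ⟨by simp, ?_⟩
    rw [ih (p ++ [d])]
    apply List.map_congr_left
    intro i _
    simp [Function.comp, List.append_assoc]

-- count over an index range is count over the prefix
theorem pvTakeCount (dv : List Int) (c : Int) :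
    ∀ (i : Nat), i ≤ dv.length →
    (List.range i).countP (fun j => decide (c < dv.getD j 0))
      = (dv.take i).countP (fun x => decide (c < x)) := by
  intro i
  induction i with
  | zero => intro _; rfl
  | succ i ih =>
    intro hi
    have hii : i < dv.length := by omega
    rw [List.range_succ, List.take_add_one, List.countP_append, List.countP_append,
      ih (by omega)]
    simp [List.getElem?_eq_getElem hii]

-- ---------- phase 1: both divisor lists are (pyRange 1 (n+1) 1).map pvNd ----------

theorem pvDivA (n : Int) :
    ((PySem.List.pyRange 1 (n + 1) 1).foldl (fun acc i =>
      let count : Int :=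
        (PySem.List.pyRange 1 (i + 1) 1).foldl
          (fun c j => if PySem.Int.mod i j == 0 then c + 1 else c) 0
      acc ++ [count]) [])
    = (PySem.List.pyRange 1 (n + 1) 1).map pvNd := by
  rw [PySem.List.foldl_append_singleton_eq_map
    (f := fun i => (PySem.List.pyRange 1 (i + 1) 1).foldl
          (fun c j => if PySem.Int.mod i j == 0 then c + 1 else c) 0)]
  rw [List.nil_append]
  apply List.map_congr_left
  intro i _
  rw [PySem.List.foldl_if_add_one (p := fun j => PySem.Int.mod i j == 0)]
  simp [pvNd]

theorem pvIncLen (ms : List Int) : ∀ (arr : List Int),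
    (ms.foldl (fun a m =>
      PySem.List.pySetD a (m - 1) (PySem.List.pyGetD a (m - 1) 0 + 1)) arr).length
    = arr.length := by
  induction ms with
  | nil => intro arr; rfl
  | cons m ms ih => intro arr; rw [List.foldl_cons, ih, PySem.List.length_pySetD]

theorem pvSieveLen (js : List Int) (n : Int) : ∀ (arr : List Int),
    (js.foldl (fun arr j =>
      (PySem.List.pyRange j (n + 1) j).foldl (fun a m =>
        PySem.List.pySetD a (m - 1) (PySem.List.pyGetD a (m - 1) 0 + 1)) arr) arr).length
    = arr.length := by
  induction js with
  | nil => intro arr; rfl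
  | cons j js ih => intro arr; rw [List.foldl_cons, ih, pvIncLen]

theorem pvIncGet (ms : List Int) : ∀ (arr : List Int) (k : Nat),
    (∀ m ∈ ms, 1 ≤ m ∧ m ≤ (arr.length : Int)) → k < arr.length →
    (ms.foldl (fun a m =>
      PySem.List.pySetD a (m - 1) (PySem.List.pyGetD a (m - 1) 0 + 1)) arr).getD k 0
    = arr.getD k 0 + (ms.count ((k : Int) + 1) : Int) := by
  induction ms with
  | nil => intro arr k _ _; simp
  | cons m ms ih =>
    intro arr k hb hk
    obtain ⟨hm1, hm2⟩ := hb m List.mem_cons_self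
    have h0 : (0:Int) ≤ m - 1 := by omega
    have hlt : m - 1 < (arr.length : Int) := by omega
    rw [List.foldl_cons]
    rw [PySem.List.pySetD_of_nonneg _ _ h0,
      PySem.List.pyGetD_eq_getElem _ _ h0 hlt]
    rw [ih _ k (by intro x hx; simpa [List.length_set] using hb x (List.mem_cons_of_mem _ hx))
      (by simpa [List.length_set] using hk)]
    have hmn : (m - 1).toNat < arr.length := by omega
    rw [List.count_cons]
    by_cases hkm : (m - 1).toNat = k
    · have hbeq : (m == (k : Int) + 1) = true := by simp; omega
      rw [hbeq]
      subst hkm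
      rw [List.getD_eq_getElem _ _ hk, List.getD_eq_getElem _ _ (by simpa using hk),
        List.getElem_set_self]
      simp
      omega
    · have hbeq : (m == (k : Int) + 1) = false := by
        simp only [beq_eq_false_iff_ne, ne_eq]
        intro h; apply hkm; omega
      rw [hbeq]
      rw [List.getD_eq_getElem _ _ hk, List.getD_eq_getElem _ _ (by simpa using hk),
        List.getElem_set_ne (by omega)]
      simp

theorem pvOuterGet (js : List Int) (n : Int) : ∀ (arr : List Int) (k : Nat),
    (∀ j ∈ js, 1 ≤ j) → ((arr.length : Int) = n) → k < arr.length →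
    (js.foldl (fun arr j =>
      (PySem.List.pyRange j (n + 1) j).foldl (fun a m =>
        PySem.List.pySetD a (m - 1) (PySem.List.pyGetD a (m - 1) 0 + 1)) arr) arr).getD k 0
    = arr.getD k 0
      + ((js.map (fun j => ((PySem.List.pyRange j (n + 1) j).count ((k : Int) + 1) : Int))).sum) := by
  induction js with
  | nil => intro arr k _ _ _; simp
  | cons j js ih =>
    intro arr k hj hlen hk
    have hj1 : (1:Int) ≤ j := hj j List.mem_cons_self
    rw [List.foldl_cons]
    rw [ih _ k (fun x hx => hj x (List.mem_cons_of_mem _ hx))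
      (by rw [pvIncLen]; exact hlen) (by rw [pvIncLen]; exact hk)]
    rw [pvIncGet _ _ k ?bounds hk]
    case bounds =>
      intro m hm
      rw [PySem.List.mem_pyRange_iff_of_pos (by omega)] at hm
      exact ⟨by omega, by omega⟩
    simp [add_assoc]

theorem pvNodupMult (j b : Int) (hj : 1 ≤ j) : (PySem.List.pyRange j b j).Nodup := by
  rw [PySem.List.pyRange_of_pos _ _ (by omega : (0:Int) < j)]
  apply List.Nodup.map _ List.nodup_range
  intro x y hxy
  simp only at hxy
  have hx : (x : Int) = y := by
    have hj0 : j ≠ 0 := by omega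
    exact mul_left_cancel₀ hj0 (by omega : j * (x:Int) = j * (y:Int))
  exact_mod_cast hx

theorem pvCountMult (j v n : Int) (hj : 1 ≤ j) (hv : 1 ≤ v) (hvn : v ≤ n) :
    ((PySem.List.pyRange j (n + 1) j).count v : Int) = if j ∣ v then 1 else 0 := by
  by_cases hd : j ∣ v
  · have hmem : v ∈ PySem.List.pyRange j (n + 1) j := by
      rw [PySem.List.mem_pyRange_iff_of_pos (by omega)]
      refine ⟨Int.le_of_dvd (by omega) hd, by omega, ?_⟩
      exact Int.dvd_sub hd dvd_rfl
    rw [List.count_eq_one_of_mem (pvNodupMult j (n+1) hj) hmem]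
    simp [hd]
  · have hmem : v ∉ PySem.List.pyRange j (n + 1) j := by
      rw [PySem.List.mem_pyRange_iff_of_pos (by omega)]
      rintro ⟨-, -, hdvd⟩
      have : j ∣ v := by
        have := Int.dvd_add hdvd (dvd_refl j)
        simpa using this
      exact hd this
    rw [List.count_eq_zero.mpr hmem]
    simp [hd]

theorem pvSumDiv (n v : Int) (hv : 1 ≤ v) (hvn : v ≤ n) :
    ((PySem.List.pyRange 1 (n + 1) 1).map
      (fun j => ((PySem.List.pyRange j (n + 1) j).count v : Int))).sum = pvNd v := by
  have h1 : ((PySem.List.pyRange 1 (n + 1) 1).map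
      (fun j => ((PySem.List.pyRange j (n + 1) j).count v : Int)))
      = ((PySem.List.pyRange 1 (n + 1) 1).map
      (fun j => if j ∣ v then (1:Int) else 0)) := by
    apply List.map_congr_left
    intro j hj
    rw [PySem.List.mem_pyRange_one] at hj
    exact pvCountMult j v n hj.1 hv hvn
  rw [h1]
  have h2 : ((PySem.List.pyRange 1 (n + 1) 1).map
      (fun j => if j ∣ v then (1:Int) else 0)).sum
      = ((PySem.List.pyRange 1 (n + 1) 1).countP (fun j => decide (j ∣ v)) : Int) := by
    have h := PySem.List.sum_map_ite_one_zero (fun j => decide (j ∣ v))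
      (PySem.List.pyRange 1 (n + 1) 1)
    simpa using h
  rw [h2]
  rw [PySem.List.pyRange_one_append 1 (v + 1) (n + 1) (by omega) (by omega),
    List.countP_append]
  have h3 : (PySem.List.pyRange (v + 1) (n + 1) 1).countP (fun j => decide (j ∣ v)) = 0 := by
    rw [List.countP_eq_zero]
    intro j hj
    rw [PySem.List.mem_pyRange_one] at hj
    simp only [decide_eq_true_eq]
    intro hdvd
    have := Int.le_of_dvd (by omega) hdvd
    omega
  rw [h3]
  have h4 : (PySem.List.pyRange 1 (v + 1) 1).countP (fun j => decide (j ∣ v))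
      = (PySem.List.pyRange 1 (v + 1) 1).countP (fun j => PySem.Int.mod v j == 0) := by
    apply List.countP_congr
    intro j _
    simp [PySem.Int.mod_eq_zero_iff_dvd]
  rw [h4]
  simp [pvNd]

theorem pvDivB (n : Int) (hn : 1 ≤ n) :
    ((PySem.List.pyRange 1 (n + 1) 1).foldl (fun arr j =>
      (PySem.List.pyRange j (n + 1) j).foldl (fun a m =>
        PySem.List.pySetD a (m - 1) (PySem.List.pyGetD a (m - 1) 0 + 1)) arr)
      (List.replicate n.toNat 0))
    = (PySem.List.pyRange 1 (n + 1) 1).map pvNd := by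
  apply List.ext_getElem
  · rw [pvSieveLen, List.length_replicate, List.length_map,
      PySem.List.length_pyRange_one]
    omega
  · intro k h1 h2
    have hklen : k < n.toNat := by
      rw [pvSieveLen, List.length_replicate] at h1; exact h1
    rw [← List.getD_eq_getElem _ 0 h1, ← List.getD_eq_getElem _ 0 h2]
    rw [pvOuterGet _ n _ k
      (by intro j hj; exact (PySem.List.mem_pyRange_one.mp hj).1)
      (by simp; omega) (by simp [hklen])]
    have hrep : (List.replicate n.toNat (0:Int)).getD k 0 = 0 := by
      rw [List.getD_eq_getElem _ _ (by simpa using hklen)]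
      simp
    rw [hrep, zero_add, pvSumDiv n ((k:Int)+1) (by omega) (by omega)]
    have hk2 : k < (PySem.List.pyRange 1 (n + 1) 1).length := by
      rw [PySem.List.length_pyRange_one]; omega
    rw [List.getD_eq_getElem _ _ (by simpa using hk2)]
    rw [List.getElem_map, PySem.List.getElem_pyRange_one _ _ _ hk2]
    congr 1
    ring

-- ---------- phase 2: both weakness lists are pvW [] dv ----------

theorem pvWkA (dv : List Int) :
    ((PySem.List.pyRange 0 (dv.length : Int) 1).foldl (fun acc i =>
      let count : Int :=
        (PySem.List.pyRange 0 i 1).foldl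
          (fun c j => if PySem.List.pyGetD dv j 0 > PySem.List.pyGetD dv i 0
                      then c + 1 else c) 0
      acc ++ [count]) [])
    = pvW [] dv := by
  rw [PySem.List.foldl_append_singleton_eq_map
    (f := fun i => (PySem.List.pyRange 0 i 1).foldl
          (fun c j => if PySem.List.pyGetD dv j 0 > PySem.List.pyGetD dv i 0
                      then c + 1 else c) 0)]
  rw [List.nil_append, pvW_map, PySem.List.pyRange_zero_natCast, List.map_map]
  apply List.map_congr_left
  intro i hi
  rw [List.mem_range] at hi
  simp only [Function.comp]
  rw [PySem.List.foldl_ite_add_one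
    (p := fun j => PySem.List.pyGetD dv j 0 > PySem.List.pyGetD dv (i : Int) 0), zero_add]
  rw [PySem.List.pyRange_zero_natCast, List.countP_map]
  have hcmp : ((fun j => decide (PySem.List.pyGetD dv (i:Int) 0 < PySem.List.pyGetD dv j 0))
      ∘ fun (k : Nat) => (k : Int))
      = fun (k : Nat) => decide (dv.getD i 0 < dv.getD k 0) := by
    funext k
    simp [Function.comp, PySem.List.pyGetD_natCast]
  have hgoal : (List.countP ((fun j => decide (PySem.List.pyGetD dv (i:Int) 0 < PySem.List.pyGetD dv j 0))
      ∘ fun (k : Nat) => (k : Int)) (List.range i) : Int)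
      = (((([] : List Int) ++ dv.take i).countP (fun x => decide (dv.getD i 0 < x)) : Nat) : Int) := by
    rw [hcmp, pvTakeCount dv (dv.getD i 0) i (by omega)]
    simp
  simpa [PySem.List.pyGetD_natCast] using hgoal

theorem pvCntNil (L : Nat) : pvCnt L [] = List.replicate L (0:Int) := by
  simp only [pvCnt, List.count_nil, Nat.cast_zero]
  rw [List.map_const']
  simp

theorem pvCntStep (L : Nat) (p : List Int) (d : Int) (hd : 0 ≤ d) (hdL : d < (L : Int)) :
    PySem.List.pySetD (pvCnt L p) d (PySem.List.pyGetD (pvCnt L p) d 0 + 1)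
      = pvCnt L (p ++ [d]) := by
  have hlen : (pvCnt L p).length = L := by simp [pvCnt]
  rw [PySem.List.pySetD_of_nonneg _ _ hd,
    PySem.List.pyGetD_eq_getElem _ _ hd (by rw [hlen]; exact_mod_cast hdL)]
  apply List.ext_getElem
  · simp [pvCnt]
  · intro k h1 h2
    have hkL : k < L := by simpa [pvCnt] using h2
    have hdt : d.toNat < L := by omega
    by_cases hk : k = d.toNat
    · subst hk
      rw [List.getElem_set_self]
      simp only [pvCnt, List.getElem_map, List.getElem_range]
      rw [List.count_append]
      have hcast : ((d.toNat : Nat) : Int) = d := by omega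
      simp [hcast]
    · rw [List.getElem_set_ne (by omega)]
      simp only [pvCnt, List.getElem_map, List.getElem_range]
      rw [List.count_append]
      have hne : ¬ d = ((k : Nat) : Int) := by omega
      simp [hne]

theorem pvSumCount (vs : List Int) (hnd : vs.Nodup) : ∀ (p : List Int),
    ((vs.map (fun v => (p.count v : Int))).sum)
      = (p.countP (fun x => decide (x ∈ vs)) : Int) := by
  intro p
  induction p with
  | nil => simp [List.map_const']
  | cons e p ih =>
    have h1 : (vs.map (fun v => ((e :: p).count v : Int)))
        = vs.map (fun v => (p.count v : Int) + if v = e then 1 else 0) := by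
      apply List.map_congr_left
      intro v _
      rw [List.count_cons]
      by_cases hv : v = e
      · subst hv; simp
      · have hbe : (e == v) = false := by
          simp only [beq_eq_false_iff_ne, ne_eq]
          exact fun hc => hv hc.symm
        simp [hbe, hv]
    rw [h1, PySem.List.sum_map_add_int, ih]
    have h2 : (vs.map (fun v => if v = e then (1:Int) else 0)).sum
        = if e ∈ vs then 1 else 0 := by
      have h := PySem.List.sum_map_ite_one_zero (fun v => decide (v = e)) vs
      simp only [decide_eq_true_eq] at h
      rw [h]
      by_cases he : e ∈ vs
      · rw [if_pos he]
        have hc : vs.countP (fun v => decide (v = e)) = vs.count e := by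
          apply List.countP_congr
          intro a _
          simp [beq_iff_eq]
        rw [hc, List.count_eq_one_of_mem hnd he]
        simp
      · rw [if_neg he]
        rw [List.countP_eq_zero.mpr]
        · simp
        · intro a ha
          simp only [decide_eq_true_eq]
          intro h'; exact he (h' ▸ ha)
    rw [h2, List.countP_cons]
    by_cases he : e ∈ vs <;> simp [he]

theorem pvSliceSum (L : Nat) (p : List Int) (d : Int) (hd : 0 ≤ d)
    (hp : ∀ e ∈ p, 0 ≤ e ∧ e < (L : Int)) :
    (PySem.List.slice (pvCnt L p) (some (d + 1)) none).sum
      = (p.countP (fun x => decide (d < x)) : Int) := by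
  rw [PySem.List.slice_from _ (by omega : (0:Int) ≤ d + 1)]
  set k := (d + 1).toNat with hkdef
  have hk : (k : Int) = d + 1 := by omega
  by_cases hcase : L ≤ k
  · have hdrop : (pvCnt L p).drop k = [] := by
      apply List.drop_eq_nil_of_le
      simp [pvCnt]; omega
    rw [hdrop]
    have hz : p.countP (fun x => decide (d < x)) = 0 := by
      rw [List.countP_eq_zero]
      intro e he
      have := hp e he
      simp only [decide_eq_true_eq]
      omega
    simp [hz]
  · rw [Nat.not_le] at hcase
    have hrange : List.range L = List.range k ++ (List.range (L - k)).map (fun t => k + t) := by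
      rw [← List.range_add]
      congr 1
      omega
    have hdrop : (pvCnt L p).drop k
        = ((List.range (L - k)).map (fun t => ((k + t : Nat) : Int))).map
            (fun v => (p.count v : Int)) := by
      rw [pvCnt, hrange, List.map_append]
      have hlen : ((List.range k).map (fun v => (p.count ((v : Nat) : Int) : Int))).length = k := by
        simp
      rw [List.drop_left' hlen]
      simp [List.map_map, Function.comp]
    rw [hdrop]
    rw [pvSumCount _ ?nodup p]
    case nodup =>
      apply List.Nodup.map _ List.nodup_range
      intro x y hxy
      simp only at hxy
      omega
    congr 1
    apply List.countP_congr
    intro e he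
    obtain ⟨he0, heL⟩ := hp e he
    simp only [List.mem_map, List.mem_range, decide_eq_true_eq]
    constructor
    · rintro ⟨t, ht, rfl⟩
      omega
    · intro hde
      refine ⟨e.toNat - k, by omega, by omega⟩

theorem pvWkB (L : Nat) (ds : List Int) : (∀ e ∈ ds, 0 ≤ e ∧ e < (L : Int)) →
    ∀ (p : List Int) (acc : List Int), (∀ e ∈ p, 0 ≤ e ∧ e < (L : Int)) →
    ds.foldl (fun s d =>
      (PySem.List.pySetD s.1 d (PySem.List.pyGetD s.1 d 0 + 1),
       s.2 ++ [(PySem.List.slice s.1 (some (d + 1)) none).sum]))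
      (pvCnt L p, acc)
    = (pvCnt L (p ++ ds), acc ++ pvW p ds) := by
  induction ds with
  | nil => intro _ p acc _; simp [pvW]
  | cons d t ih =>
    intro hds p acc hp
    obtain ⟨hd0, hdL⟩ := hds d List.mem_cons_self
    rw [List.foldl_cons]
    have hstep :
        (PySem.List.pySetD (pvCnt L p) d (PySem.List.pyGetD (pvCnt L p) d 0 + 1),
         acc ++ [(PySem.List.slice (pvCnt L p) (some (d + 1)) none).sum])
        = (pvCnt L (p ++ [d]), acc ++ [((p.countP (fun x => decide (d < x)) : Nat) : Int)]) := by
      rw [pvCntStep L p d hd0 hdL, pvSliceSum L p d hd0 hp]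
    rw [hstep]
    rw [ih (fun e he => hds e (List.mem_cons_of_mem _ he)) (p ++ [d])
      (acc ++ [((p.countP (fun x => decide (d < x)) : Nat) : Int)])
      ?pb]
    case pb =>
      intro e he
      rcases List.mem_append.mp he with h | h
      · exact hp e h
      · rw [List.mem_singleton] at h
        subst h
        exact ⟨hd0, hdL⟩
    rw [Prod.mk.injEq]
    constructor
    · simp
    · simp [pvW]

-- ---------- phase 3: sorted-head + run = max + count ----------

theorem pvRunCount : ∀ (t : List Int) (h : Int),
    (h :: t).Pairwise (fun a b => b ≤ a) → pvRunA h t = (t.count h : Int) := by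
  intro t
  induction t with
  | nil => intro h _; simp [pvRunA]
  | cons y t ih =>
    intro h hpw
    have hyh : y ≤ h := (List.pairwise_cons.mp hpw).1 y List.mem_cons_self
    by_cases hy : y = h
    · subst hy
      rw [List.count_cons]
      simp only [pvRunA, BEq.rfl, if_true]
      have hpw' : (y :: t).Pairwise (fun a b => b ≤ a) :=
        (List.pairwise_cons.mp hpw).2
      rw [ih y hpw']
      simp
      omega
    · have hbeq : (y == h) = false := by simp [hy]
      simp only [pvRunA, hbeq]
      rw [List.count_cons]
      have hcnt : t.count h = 0 := by
        rw [List.count_eq_zero]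
        intro hmem
        rcases List.pairwise_cons.mp hpw with ⟨hall, hyt⟩
        have h1 := (List.pairwise_cons.mp hyt).1 h hmem
        have h2 := hall h (List.mem_cons_of_mem _ hmem)
        omega
      have hhy : ¬ y = h := hy
      simp [hcnt, hhy]

theorem pvFinal (ws : List Int) (hne : ws ≠ []) :
    [PySem.List.pyGetD (PySem.List.sorted ws (fun x => x) true) 0 0,
     1 + pvRunA (PySem.List.pyGetD (PySem.List.sorted ws (fun x => x) true) 0 0)
         ((PySem.List.sorted ws (fun x => x) true).drop 1)]
    = [(PySem.List.max? ws (fun x => x)).getD 0,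
       (ws.count ((PySem.List.max? ws (fun x => x)).getD 0) : Int)] := by
  obtain ⟨mx, hmx⟩ : ∃ mx, PySem.List.max? ws (fun x => x) = some mx := by
    cases hcase : PySem.List.max? ws (fun x => x) with
    | none => exact absurd ((PySem.List.max?_eq_none_iff ws _).mp hcase) hne
    | some m => exact ⟨m, rfl⟩
  have hsne : PySem.List.sorted ws (fun x => x) true ≠ [] := by
    rw [ne_eq, PySem.List.sorted_eq_nil_iff]
    exact hne
  obtain ⟨h, t, hs⟩ : ∃ h t, PySem.List.sorted ws (fun x => x) true = h :: t := by
    cases hcase : PySem.List.sorted ws (fun x => x) true with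
    | nil => exact absurd hcase hsne
    | cons h t => exact ⟨h, t, rfl⟩
  have hhm : h = mx := by
    have h1 : h ≤ mx := by
      apply PySem.List.max?_isMax hmx
      rw [← PySem.List.mem_sorted ws (fun x => x) true, hs]
      exact List.mem_cons_self
    have h2 : mx ≤ h :=
      PySem.List.key_head_sorted_rev_ge ws (fun x => x) hs mx (PySem.List.max?_mem hmx)
    omega
  have hpw : (h :: t).Pairwise (fun a b => b ≤ a) := by
    have := PySem.List.sorted_pairwise_rev ws (fun x => x)
    rwa [hs] at this
  rw [hs, hmx]
  simp only [PySem.List.pyGetD_zero_cons, List.drop_one, List.tail_cons, Option.getD_some]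
  rw [pvRunCount t h hpw, ← hhm]
  have hcnt : ws.count h = (h :: t).count h := by
    rw [← (PySem.List.sorted_perm ws (fun x => x) true).count_eq h, hs]
  rw [hcnt, List.count_cons]
  simp
  omega

-- ---------- assembly ----------

theorem pvNd_nonneg (i : Int) : 0 ≤ pvNd i := by
  simp [pvNd]

-- ===== VERDICT (by name: the statement is the Claim_ definition above) =====
theorem weakNumbers_spec : Claim_equal_weakNumbers := by
  intro n _ hpre
  have hn : (1:Int) ≤ n := hpre
  unfold Spec_weakNumbers weakNumbers weakNumbers_alt
  simp only []
  rw [pvDivA, pvDivB n hn]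
  set dv := (PySem.List.pyRange 1 (n + 1) 1).map pvNd with hdv
  have hdvlen : dv.length = n.toNat := by
    rw [hdv, List.length_map, PySem.List.length_pyRange_one]; omega
  have hdvne : dv ≠ [] := by
    intro hnil
    rw [hnil] at hdvlen
    simp at hdvlen
    omega
  obtain ⟨mx, hmx⟩ : ∃ mx, PySem.List.max? dv (fun x => x) = some mx := by
    cases hcase : PySem.List.max? dv (fun x => x) with
    | none => exact absurd ((PySem.List.max?_eq_none_iff dv _).mp hcase) hdvne
    | some m => exact ⟨m, rfl⟩
  have hmx0 : 0 ≤ mx := by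
    have hm := PySem.List.max?_mem hmx
    rw [hdv, List.mem_map] at hm
    obtain ⟨i, -, rfl⟩ := hm
    exact pvNd_nonneg i
  have hbounds : ∀ e ∈ dv, 0 ≤ e ∧ e < (((mx + 1).toNat : Nat) : Int) := by
    intro e he
    have h1 : 0 ≤ e := by
      rw [hdv, List.mem_map] at he
      obtain ⟨i, -, rfl⟩ := he
      exact pvNd_nonneg i
    have h2 : e ≤ mx := PySem.List.max?_isMax hmx e he
    exact ⟨h1, by omega⟩
  rw [hmx]
  simp only [Option.getD_some]
  rw [← pvCntNil ((mx + 1).toNat)]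
  rw [pvWkB ((mx + 1).toNat) dv hbounds [] [] (by intro e he; simp at he)]
  simp only [List.nil_append]
  rw [pvWkA]
  have hwne : pvW [] dv ≠ [] := by
    intro hnil
    have hl := pvW_length dv []
    rw [hnil] at hl
    simp at hl
    rw [hdvlen] at hl
    omega
  have hfin := pvFinal (pvW [] dv) hwne
  rw [List.cons.injEq, List.cons.injEq] at hfin
  rw [List.cons.injEq, List.cons.injEq]
  exact ⟨hfin.1, hfin.2.1, rfl⟩
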